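-- pv_equiv track=rewrite | github.com/Ace1928/eidosian_forge | archive_forge/code/class_FileAuthority.py | _cbAllRecords
-- ===== SOURCE A (Python) =====
-- def _cbAllRecords(results):
--     ans, auth, add = ([], [], [])
--     for res in results:
--         if res[0]:
--             ans.extend(res[1][0])
--             auth.extend(res[1][1])
--             add.extend(res[1][2])
--     return (ans, auth, add)
-- ===== SOURCE B (Python) =====
-- def _cbAllRecords(results):
--     # Divide-and-conquer: split, recurse on each half, concatenate the
--     # three columns; concatenation is associative so this equals the
--     # left-to-right accumulation.  Recursion depth is O(log n).
--     if not results: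
--         return ([], [], [])
--     if len(results) == 1:
--         res = results[0]
--         if res[0]:
--             return (list(res[1][0]), list(res[1][1]), list(res[1][2]))
--         return ([], [], [])
--     mid = len(results) // 2
--     l = _cbAllRecords(results[:mid])
--     r = _cbAllRecords(results[mid:])
--     return (l[0] + r[0], l[1] + r[1], l[2] + r[2])
-- ===== Notes on version B (the rewrite author's own statement) =====
-- stated objective: alternative
-- what changed: Replaces the single interleaved accumulating pass with a divide-and-conquer recursion that splits the list in half, solves each half, and concatenates the three columns (correct by associativity of concatenation).
import Mathlib
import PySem

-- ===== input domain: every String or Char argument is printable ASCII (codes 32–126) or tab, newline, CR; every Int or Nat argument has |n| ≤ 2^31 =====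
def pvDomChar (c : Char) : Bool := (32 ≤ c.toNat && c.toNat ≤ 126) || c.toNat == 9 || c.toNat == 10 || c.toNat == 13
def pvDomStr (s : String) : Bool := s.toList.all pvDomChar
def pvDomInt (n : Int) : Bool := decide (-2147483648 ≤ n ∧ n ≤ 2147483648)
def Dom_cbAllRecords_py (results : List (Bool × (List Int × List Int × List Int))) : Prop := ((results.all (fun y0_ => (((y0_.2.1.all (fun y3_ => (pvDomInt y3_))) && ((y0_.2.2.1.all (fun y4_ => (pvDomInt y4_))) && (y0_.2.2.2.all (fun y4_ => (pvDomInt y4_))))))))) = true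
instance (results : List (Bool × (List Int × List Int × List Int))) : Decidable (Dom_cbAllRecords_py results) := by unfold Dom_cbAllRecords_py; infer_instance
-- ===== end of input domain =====

-- B replaces A's single interleaved accumulating pass by a divide-and-conquer split-and-concatenate recursion (objective: alternative, same cost).

-- ===== PORT A =====
-- Literal port of A: one pass, three accumulators extended in order.
def cbAllRecords_py (results : List (Bool × (List Int × List Int × List Int))) : List Int × List Int × List Int :=
  results.foldl
    (fun acc res =>
      if res.1 then (acc.1 ++ res.2.1, acc.2.1 ++ res.2.2.1, acc.2.2 ++ res.2.2.2)
      else acc)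
    ([], [], [])

-- ===== PORT B =====
-- Port of B: split the list in half, recurse on each half, concatenate the three columns.
def cbAllRecords_py_alt (results : List (Bool × (List Int × List Int × List Int))) : List Int × List Int × List Int :=
  if h : results.length ≤ 1 then
    match results with
    | [] => ([], [], [])
    | res :: _ => if res.1 then (res.2.1, res.2.2.1, res.2.2.2) else ([], [], [])
  else
    let mid := results.length / 2
    let l := cbAllRecords_py_alt (results.take mid)
    let r := cbAllRecords_py_alt (results.drop mid)
    (l.1 ++ r.1, l.2.1 ++ r.2.1, l.2.2 ++ r.2.2)
termination_by results.length
decreasing_by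
  · simp [List.length_take]; omega
  · simp [List.length_drop]; omega

-- ===== PRECONDITION & SPEC =====
def Spec_cbAllRecords_py (results : List (Bool × (List Int × List Int × List Int))) (out : List Int × List Int × List Int) : Prop := out = cbAllRecords_py_alt results
instance (results : List (Bool × (List Int × List Int × List Int))) (out : List Int × List Int × List Int) : Decidable (Spec_cbAllRecords_py results out) := by unfold Spec_cbAllRecords_py; infer_instance

-- ===== CLAIM (what is proved, stated in full; the proofs are below) =====
def Claim_equal_cbAllRecords_py : Prop := ∀ (results : List (Bool × (List Int × List Int × List Int))), Dom_cbAllRecords_py results → Spec_cbAllRecords_py results (cbAllRecords_py results)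

-- ===== LEMMAS AND PROOFS =====

-- Canonical characterization: the three flattened columns of the kept payloads.
def pvCols (results : List (Bool × (List Int × List Int × List Int))) : List Int × List Int × List Int :=
  (((results.filter (fun res => res.1)).map (fun res => res.2)).flatMap (fun p => p.1),
   ((results.filter (fun res => res.1)).map (fun res => res.2)).flatMap (fun p => p.2.1),
   ((results.filter (fun res => res.1)).map (fun res => res.2)).flatMap (fun p => p.2.2))

theorem pvCols_append (a b : List (Bool × (List Int × List Int × List Int))) :
    pvCols (a ++ b)
      = ((pvCols a).1 ++ (pvCols b).1, (pvCols a).2.1 ++ (pvCols b).2.1,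
         (pvCols a).2.2 ++ (pvCols b).2.2) := by
  simp [pvCols]

-- A's loop invariant: the fold from any accumulator appends the three columns.
theorem foldA_eq (results : List (Bool × (List Int × List Int × List Int)))
    (a b c : List Int) :
    results.foldl
      (fun acc res =>
        if res.1 then (acc.1 ++ res.2.1, acc.2.1 ++ res.2.2.1, acc.2.2 ++ res.2.2.2)
        else acc)
      (a, b, c)
    = (a ++ (pvCols results).1, b ++ (pvCols results).2.1, c ++ (pvCols results).2.2) := by
  induction results generalizing a b c with
  | nil => simp [pvCols]
  | cons hd tl ih =>
    by_cases h : hd.1 <;> simp [h, ih, pvCols]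

-- B's divide-and-conquer equals the same three columns, by strong induction on length.
theorem alt_eq_cols : ∀ (n : ℕ) (results : List (Bool × (List Int × List Int × List Int))),
    results.length = n → cbAllRecords_py_alt results = pvCols results := by
  intro n
  induction n using Nat.strong_induction_on with
  | _ n ih =>
    intro results hlen
    rw [cbAllRecords_py_alt]
    by_cases h : results.length ≤ 1
    · simp only [h, dif_pos]
      match results with
      | [] => simp [pvCols]
      | [res] => by_cases hr : res.1 <;> simp [hr, pvCols]
      | x :: y :: rest => simp at h
    · simp only [h, dif_neg, not_false_iff]
      have h1 : (results.take (results.length / 2)).length < n := by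
        simp [List.length_take]; omega
      have h2 : (results.drop (results.length / 2)).length < n := by
        simp [List.length_drop]; omega
      rw [ih _ h1 _ rfl, ih _ h2 _ rfl]
      have := pvCols_append (results.take (results.length / 2)) (results.drop (results.length / 2))
      rw [List.take_append_drop] at this
      rw [this]

-- ===== VERDICT (by name: the statement is the Claim_ definition above) =====
theorem cbAllRecords_py_spec : Claim_equal_cbAllRecords_py := by
  intro results _
  show cbAllRecords_py results = cbAllRecords_py_alt results
  rw [alt_eq_cols results.length results rfl]
  simpa using foldA_eq results [] [] []
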